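-- pv_equiv track=rewrite | github.com/SalesforceAIResearch/MCPEval | mcp_servers/sports/server.py | _format_teams_data
-- ===== SOURCE A (Python) =====
-- from typing import Dict, Any, List, Optional, Literal
--
-- def _format_teams_data(teams_data: List[Dict], league: str) -> str:
--     """Format teams data for display."""
--     if not teams_data:
--         return "No teams found."
--
--     formatted_teams = []
--
--     for team in teams_data:
--         if league == "NBA":
--             formatted_team = (
--                 f"Team ID: {team.get('id', 'N/A')}\n"
--                 f"Full Name: {team.get('full_name', 'N/A')}\n"
--                 f"Name: {team.get('name', 'N/A')}\n"
--                 f"Abbreviation: {team.get('abbreviation', 'N/A')}\n"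
--                 f"City: {team.get('city', 'N/A')}\n"
--                 f"Conference: {team.get('conference', 'N/A')}\n"
--                 f"Division: {team.get('division', 'N/A')}"
--             )
--         elif league == "MLB":
--             formatted_team = (
--                 f"Team ID: {team.get('id', 'N/A')}\n"
--                 f"Display Name: {team.get('display_name', 'N/A')}\n"
--                 f"Name: {team.get('name', 'N/A')}\n"
--                 f"Abbreviation: {team.get('abbreviation', 'N/A')}\n"
--                 f"Location: {team.get('location', 'N/A')}\n"
--                 f"League: {team.get('league', 'N/A')}\n"
--                 f"Division: {team.get('division', 'N/A')}\n"
--                 f"Slug: {team.get('slug', 'N/A')}"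
--             )
--         else:  # NFL
--             formatted_team = (
--                 f"Team ID: {team.get('id', 'N/A')}\n"
--                 f"Name: {team.get('name', 'N/A')}\n"
--                 f"Abbreviation: {team.get('abbreviation', 'N/A')}\n"
--                 f"Full Name: {team.get('full_name', 'N/A')}\n"
--                 f"Location: {team.get('location', 'N/A')}\n"
--                 f"Conference: {team.get('conference', 'N/A')}\n"
--                 f"Division: {team.get('division', 'N/A')}"
--             )
--
--         formatted_teams.append(formatted_team)
--
--     return "\n-----\n".join(formatted_teams)
-- ===== SOURCE B (Python) =====
-- _FIELD_SPECS = {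
--     "NBA": [("Team ID", "id"), ("Full Name", "full_name"), ("Name", "name"),
--             ("Abbreviation", "abbreviation"), ("City", "city"),
--             ("Conference", "conference"), ("Division", "division")],
--     "MLB": [("Team ID", "id"), ("Display Name", "display_name"), ("Name", "name"),
--             ("Abbreviation", "abbreviation"), ("Location", "location"),
--             ("League", "league"), ("Division", "division"), ("Slug", "slug")],
-- }
-- _NFL_SPEC = [("Team ID", "id"), ("Name", "name"), ("Abbreviation", "abbreviation"),
--              ("Full Name", "full_name"), ("Location", "location"),
--              ("Conference", "conference"), ("Division", "division")]
--
--
-- def _format_teams_data(teams_data, league):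
--     if not teams_data:
--         return "No teams found."
--     spec = _FIELD_SPECS.get(league, _NFL_SPEC)
--     return "\n-----\n".join(
--         "\n".join(f"{label}: {team.get(key, 'N/A')}" for label, key in spec)
--         for team in teams_data
--     )
-- ===== Notes on version B (the rewrite author's own statement) =====
-- stated objective: idiomatic
-- what changed: Replaces the per-league hard-coded f-string blocks with a data table mapping league to an ordered (label, key) field list (NFL as fallback) and a generic field loop joined with newlines.
import Mathlib
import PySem

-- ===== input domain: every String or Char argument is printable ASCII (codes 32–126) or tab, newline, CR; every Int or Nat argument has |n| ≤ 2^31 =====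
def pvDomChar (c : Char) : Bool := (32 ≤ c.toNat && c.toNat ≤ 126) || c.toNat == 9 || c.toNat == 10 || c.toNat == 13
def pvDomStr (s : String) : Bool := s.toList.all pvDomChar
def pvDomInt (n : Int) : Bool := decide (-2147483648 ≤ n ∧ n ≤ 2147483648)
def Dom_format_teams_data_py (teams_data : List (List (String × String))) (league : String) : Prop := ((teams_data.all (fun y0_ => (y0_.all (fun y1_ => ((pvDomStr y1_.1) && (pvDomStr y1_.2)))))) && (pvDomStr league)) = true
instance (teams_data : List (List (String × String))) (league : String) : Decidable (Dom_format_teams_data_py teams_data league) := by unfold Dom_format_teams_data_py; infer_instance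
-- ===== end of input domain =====

-- B replaces A's three hard-coded f-string blocks with a league→(label,key) field table
-- (NFL as fallback) and one generic field loop; same output, more idiomatic.

-- dict.get(key, "N/A") on the association-list dict (first match)
def pvGetNA (team : List (String × String)) (k : String) : String :=
  (((team.find? (fun p => p.1 == k))).map (·.2)).getD "N/A"

-- ===== PORT A =====
def format_teams_data_py (teams_data : List (List (String × String))) (league : String) : String :=
  if teams_data = [] then "No teams found."
  else
    let formatted_teams :=
      teams_data.foldl (fun acc team =>
        let formatted_team :=
          if league == "NBA" then
            "Team ID: " ++ pvGetNA team "id" ++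
            "\nFull Name: " ++ pvGetNA team "full_name" ++
            "\nName: " ++ pvGetNA team "name" ++
            "\nAbbreviation: " ++ pvGetNA team "abbreviation" ++
            "\nCity: " ++ pvGetNA team "city" ++
            "\nConference: " ++ pvGetNA team "conference" ++
            "\nDivision: " ++ pvGetNA team "division"
          else if league == "MLB" then
            "Team ID: " ++ pvGetNA team "id" ++
            "\nDisplay Name: " ++ pvGetNA team "display_name" ++
            "\nName: " ++ pvGetNA team "name" ++
            "\nAbbreviation: " ++ pvGetNA team "abbreviation" ++
            "\nLocation: " ++ pvGetNA team "location" ++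
            "\nLeague: " ++ pvGetNA team "league" ++
            "\nDivision: " ++ pvGetNA team "division" ++
            "\nSlug: " ++ pvGetNA team "slug"
          else
            "Team ID: " ++ pvGetNA team "id" ++
            "\nName: " ++ pvGetNA team "name" ++
            "\nAbbreviation: " ++ pvGetNA team "abbreviation" ++
            "\nFull Name: " ++ pvGetNA team "full_name" ++
            "\nLocation: " ++ pvGetNA team "location" ++
            "\nConference: " ++ pvGetNA team "conference" ++
            "\nDivision: " ++ pvGetNA team "division"
        acc ++ [formatted_team]) []
    PySem.Str.join "\n-----\n" formatted_teams

-- ===== PORT B =====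
def pvSpecNBA : List (String × String) :=
  [("Team ID", "id"), ("Full Name", "full_name"), ("Name", "name"),
   ("Abbreviation", "abbreviation"), ("City", "city"),
   ("Conference", "conference"), ("Division", "division")]
def pvSpecMLB : List (String × String) :=
  [("Team ID", "id"), ("Display Name", "display_name"), ("Name", "name"),
   ("Abbreviation", "abbreviation"), ("Location", "location"),
   ("League", "league"), ("Division", "division"), ("Slug", "slug")]
def pvSpecNFL : List (String × String) :=
  [("Team ID", "id"), ("Name", "name"), ("Abbreviation", "abbreviation"),
   ("Full Name", "full_name"), ("Location", "location"),
   ("Conference", "conference"), ("Division", "division")]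

def format_teams_data_py_alt (teams_data : List (List (String × String))) (league : String) : String :=
  if teams_data = [] then "No teams found."
  else
    let spec :=
      ((([("NBA", pvSpecNBA), ("MLB", pvSpecMLB)] :
          List (String × List (String × String))).find? (fun p => p.1 == league)).map (·.2)).getD pvSpecNFL
    PySem.Str.join "\n-----\n"
      (teams_data.map (fun team =>
        PySem.Str.join "\n" (spec.map (fun lk => lk.1 ++ ": " ++ pvGetNA team lk.2))))

-- ===== PRECONDITION & SPEC =====
def Spec_format_teams_data_py (teams_data : List (List (String × String))) (league : String) (out : String) : Prop := out = format_teams_data_py_alt teams_data league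
instance (teams_data : List (List (String × String))) (league : String) (out : String) : Decidable (Spec_format_teams_data_py teams_data league out) := by unfold Spec_format_teams_data_py; infer_instance

-- ===== CLAIM (what is proved, stated in full; the proofs are below) =====
def Claim_equal_format_teams_data_py : Prop := ∀ (teams_data : List (List (String × String))) (league : String), Dom_format_teams_data_py teams_data league → Spec_format_teams_data_py teams_data league (format_teams_data_py teams_data league)

-- ===== LEMMAS AND PROOFS =====

theorem pv_join_cons (sep a b : String) (rest : List String) :
    PySem.Str.join sep (a :: b :: rest) = a ++ sep ++ PySem.Str.join sep (b :: rest) := by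
  simp [PySem.Str.join, PySem.Chars.join_cons_cons, String.append_assoc]

theorem pv_join_single (sep a : String) : PySem.Str.join sep [a] = a := by
  simp [PySem.Str.join, PySem.Chars.join_singleton]

theorem pv_foldl_append_map {α β : Type} (f : α → β) (xs : List α) (acc : List β) :
    xs.foldl (fun a x => a ++ [f x]) acc = acc ++ xs.map f := by
  induction xs generalizing acc with
  | nil => simp
  | cons x xs ih => simp [List.foldl, ih]

theorem pv_block_eq (team : List (String × String)) (league : String) :
    (if league == "NBA" then
        "Team ID: " ++ pvGetNA team "id" ++
        "\nFull Name: " ++ pvGetNA team "full_name" ++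
        "\nName: " ++ pvGetNA team "name" ++
        "\nAbbreviation: " ++ pvGetNA team "abbreviation" ++
        "\nCity: " ++ pvGetNA team "city" ++
        "\nConference: " ++ pvGetNA team "conference" ++
        "\nDivision: " ++ pvGetNA team "division"
      else if league == "MLB" then
        "Team ID: " ++ pvGetNA team "id" ++
        "\nDisplay Name: " ++ pvGetNA team "display_name" ++
        "\nName: " ++ pvGetNA team "name" ++
        "\nAbbreviation: " ++ pvGetNA team "abbreviation" ++
        "\nLocation: " ++ pvGetNA team "location" ++
        "\nLeague: " ++ pvGetNA team "league" ++
        "\nDivision: " ++ pvGetNA team "division" ++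
        "\nSlug: " ++ pvGetNA team "slug"
      else
        "Team ID: " ++ pvGetNA team "id" ++
        "\nName: " ++ pvGetNA team "name" ++
        "\nAbbreviation: " ++ pvGetNA team "abbreviation" ++
        "\nFull Name: " ++ pvGetNA team "full_name" ++
        "\nLocation: " ++ pvGetNA team "location" ++
        "\nConference: " ++ pvGetNA team "conference" ++
        "\nDivision: " ++ pvGetNA team "division") =
    PySem.Str.join "\n"
      ((((([("NBA", pvSpecNBA), ("MLB", pvSpecMLB)] :
          List (String × List (String × String))).find? (fun p => p.1 == league)).map (·.2)).getD pvSpecNFL).map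
        (fun lk => lk.1 ++ ": " ++ pvGetNA team lk.2)) := by
  by_cases h1 : league = "NBA"
  · subst h1
    apply String.toList_injective
    simp [pvSpecNBA, List.find?, pv_join_cons, pv_join_single]
  · by_cases h2 : league = "MLB"
    · subst h2
      apply String.toList_injective
      simp [pvSpecMLB, List.find?, pv_join_cons, pv_join_single]
    · have hc1 : ("NBA" == league) = false := by simp; exact fun h => h1 h.symm
      have hc2 : ("MLB" == league) = false := by simp; exact fun h => h2 h.symm
      apply String.toList_injective
      simp [pvSpecNFL, List.find?, h1, h2, hc1, hc2, pv_join_cons, pv_join_single]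

-- ===== VERDICT (by name: the statement is the Claim_ definition above) =====
theorem format_teams_data_py_spec : Claim_equal_format_teams_data_py := by
  intro teams_data league _
  unfold Spec_format_teams_data_py format_teams_data_py format_teams_data_py_alt
  by_cases h : teams_data = []
  · simp [h]
  · simp only [h, if_neg, not_false_iff]
    rw [pv_foldl_append_map]
    simp only [List.nil_append]
    congr 1
    apply List.map_congr_left
    intro team _
    exact pv_block_eq team league
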